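-- pv_equiv track=rewrite | github.com/Lightning-AI/torchmetrics | src/torchmetrics/functional/text/ter.py | _find_shifted_pairs
-- ===== SOURCE A (Python) =====
-- from typing import Dict, Iterator, List, Optional, Sequence, Tuple, Union
--
-- _MAX_SHIFT_SIZE = 10
--
-- _MAX_SHIFT_DIST = 50
--
-- def _find_shifted_pairs(pred_words: List[str], target_words: List[str]) -> Iterator[Tuple[int, int, int]]:
--     """Find matching word sub-sequences in two lists of words. Ignores sub-sequences starting at the same position.
--
--     Args:
--         pred_words: A list of a tokenized hypothesis sentence.
--         target_words: A list of a tokenized reference sentence.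
--
--     Return:
--         Yields tuples of ``target_start, pred_start, length`` such that:
--         ``target_words[target_start : target_start + length] == pred_words[pred_start : pred_start + length]``
--
--         pred_start:
--             A list of hypothesis start indices.
--         target_start:
--             A list of reference start indices.
--         length:
--             A length of a word span to be considered.
--     """
--     for pred_start in range(len(pred_words)):
--         for target_start in range(len(target_words)):
--             # this is slightly different from what tercom does but this should
--             # really only kick in in degenerate cases
--             if abs(target_start - pred_start) > _MAX_SHIFT_DIST:
--                 continue
--
--             for length in range(1, _MAX_SHIFT_SIZE):
--                 # Check if hypothesis and reference are equal so far
--                 if pred_words[pred_start + length - 1] != target_words[target_start + length - 1]: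
--                     break
--                 yield pred_start, target_start, length
--
--                 # Stop processing once a sequence is consumed.
--                 _hyp = len(pred_words) == pred_start + length
--                 _ref = len(target_words) == target_start + length
--                 if _hyp or _ref:
--                     break
-- ===== SOURCE B (Python) =====
-- _MAX_SHIFT_SIZE = 10
--
-- _MAX_SHIFT_DIST = 50
--
--
-- def _find_shifted_pairs(pred_words, target_words):
--     # Dynamic programming on suffix rows: walk pred positions from the end; for row p keep a
--     # dict mapping each in-window matching target position t to the length of the common run
--     # starting at (p, t), computed from the previous row's entry at t+1 (classic
--     # longest-common-substring recurrence).  Rows are emitted in reverse at the end, so no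
--     # per-pair character-by-character extension loop is ever run.
--     plen = len(pred_words)
--     tlen = len(target_words)
--     rows = []
--     prev = {}
--     for p in range(plen - 1, -1, -1):
--         w = pred_words[p]
--         cur = {}
--         row = []
--         for t in range(max(0, p - _MAX_SHIFT_DIST), min(tlen, p + _MAX_SHIFT_DIST + 1)):
--             if target_words[t] == w:
--                 run = prev.get(t + 1, 0) + 1
--                 cur[t] = run
--                 m = min(run, _MAX_SHIFT_SIZE - 1)
--                 for length in range(1, m + 1):
--                     row.append((p, t, length))
--         rows.append(row)
--         prev = cur
--     for row in reversed(rows):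
--         yield from row
-- ===== Notes on version B (the rewrite author's own statement) =====
-- stated objective: faster
-- what changed: B replaces A's per-pair prefix-extension scan by a suffix dynamic program: one backward pass over pred positions keeps a per-row dict of common-run lengths via the longest-common-substring recurrence run(p,t)=run(p+1,t+1)+1 (only for target positions inside the +-50 window), emits each row from the dict, and yields the rows in reverse at the end.
import Mathlib
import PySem

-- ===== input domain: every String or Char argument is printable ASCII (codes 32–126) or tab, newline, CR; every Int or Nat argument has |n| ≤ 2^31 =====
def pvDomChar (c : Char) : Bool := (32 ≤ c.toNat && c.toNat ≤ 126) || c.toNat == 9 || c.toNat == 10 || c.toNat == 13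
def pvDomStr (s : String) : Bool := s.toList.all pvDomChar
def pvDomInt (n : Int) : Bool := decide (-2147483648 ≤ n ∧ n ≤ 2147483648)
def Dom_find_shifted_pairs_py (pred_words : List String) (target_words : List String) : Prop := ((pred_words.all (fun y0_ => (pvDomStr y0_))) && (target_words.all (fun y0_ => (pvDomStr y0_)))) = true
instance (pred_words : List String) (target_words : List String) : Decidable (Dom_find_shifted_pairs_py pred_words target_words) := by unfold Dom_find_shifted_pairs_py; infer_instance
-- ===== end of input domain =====

-- B replaces A's per-pair prefix-extension scan by a suffix dynamic program (one backward
-- pass keeping a per-row dict of common-run lengths, rows emitted in reverse at the end);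
-- a timing run measured it faster (objective: faster).

-- ===== PORT A =====
-- the innermost 'for length in range(1, _MAX_SHIFT_SIZE)' loop with its two breaks;
-- fuel = number of remaining iterations of the range
def pvInnerA (pred_words target_words : List String) (p t : Int) : Int → Nat → List (Int × Int × Int) → List (Int × Int × Int)
  | _, 0, acc => acc
  | l, Nat.succ fuel, acc =>
    if PySem.List.pyGet? pred_words (p + l - 1) ≠ PySem.List.pyGet? target_words (t + l - 1) then acc
    else
      let acc := acc ++ [(p, t, l)]
      if (pred_words.length : Int) = p + l ∨ (target_words.length : Int) = t + l then acc
      else pvInnerA pred_words target_words p t (l + 1) fuel acc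

def find_shifted_pairs_py (pred_words : List String) (target_words : List String) : List (Int × Int × Int) :=
  (PySem.List.pyRange 0 (pred_words.length : Int) 1).foldl (fun acc p =>
    (PySem.List.pyRange 0 (target_words.length : Int) 1).foldl (fun acc t =>
      if 50 < (t - p).natAbs then acc
      else pvInnerA pred_words target_words p t 1 9 acc) acc) []

-- ===== PORT B =====
-- body of B's outer loop: one row of the suffix DP — 'for t in range(max(0, p-50), min(tlen, p+51)):
--   if target_words[t] == w: run = prev.get(t+1, 0) + 1; cur[t] = run; for length in range(1, min(run,9)+1): row.append(...)'
def pvRowLoopB (pred_words target_words : List String) (prev : PySem.Dict Int Int) (p : Int) :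
    PySem.Dict Int Int × List (Int × Int × Int) :=
  let tlen : Int := target_words.length
  let w := PySem.List.pyGetD pred_words p ""
  (PySem.List.pyRange (max 0 (p - 50)) (min tlen (p + 51)) 1).foldl
    (fun cr t =>
      if PySem.List.pyGetD target_words t "" = w then
        let run := prev.getD (t + 1) 0 + 1
        let cur := cr.1.insert t run
        let m := min run 9
        let row := (PySem.List.pyRange 1 (m + 1) 1).foldl (fun row length => row ++ [(p, t, length)]) cr.2
        (cur, row)
      else cr)
    (PySem.Dict.empty, [])

def find_shifted_pairs_py_alt (pred_words : List String) (target_words : List String) : List (Int × Int × Int) :=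
  let plen : Int := pred_words.length
  let res := (PySem.List.pyRange (plen - 1) (-1) (-1)).foldl
    (fun (s : List (List (Int × Int × Int)) × PySem.Dict Int Int) p =>
      let inner := pvRowLoopB pred_words target_words s.2 p
      (s.1 ++ [inner.2], inner.1))
    ([], PySem.Dict.empty)
  res.1.reverse.foldl (fun out row => out ++ row) []

-- ===== PRECONDITION & SPEC =====
def Spec_find_shifted_pairs_py (pred_words : List String) (target_words : List String) (out : List (Int × Int × Int)) : Prop := out = find_shifted_pairs_py_alt pred_words target_words
instance (pred_words : List String) (target_words : List String) (out : List (Int × Int × Int)) : Decidable (Spec_find_shifted_pairs_py pred_words target_words out) := by unfold Spec_find_shifted_pairs_py; infer_instance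

-- ===== CLAIM (what is proved, stated in full; the proofs are below) =====
def Claim_equal_find_shifted_pairs_py : Prop := ∀ (pred_words : List String) (target_words : List String), Dom_find_shifted_pairs_py pred_words target_words → Spec_find_shifted_pairs_py pred_words target_words (find_shifted_pairs_py pred_words target_words)

-- ===== LEMMAS AND PROOFS =====

-- length of the common run of equal words starting at (p, t)
def pvRunL (pred_words target_words : List String) (p t : Int) : Nat :=
  if h : 0 ≤ p ∧ p < (pred_words.length : Int) ∧ 0 ≤ t ∧ t < (target_words.length : Int) ∧
      PySem.List.pyGet? pred_words p = PySem.List.pyGet? target_words t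
  then pvRunL pred_words target_words (p + 1) (t + 1) + 1
  else 0
termination_by ((pred_words.length : Int) - p).toNat
decreasing_by omega

-- what row p's dict holds at key t: the run length, but only inside the ±50 window
def pvR (pred_words target_words : List String) (p t : Int) : Int :=
  if p - 50 ≤ t ∧ t < p + 51 then (pvRunL pred_words target_words p t : Int) else 0

-- the pairs emitted for a fixed pred position p, in target order
def pvRowA (pred_words target_words : List String) (p : Int) : List (Int × Int × Int) :=
  (PySem.List.pyRange (max 0 (p - 50)) (min (target_words.length : Int) (p + 51)) 1).flatMap
    (fun t => (PySem.List.pyRange 1 (((min (pvRunL pred_words target_words p t) 9 : Nat) : Int) + 1) 1).map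
      (fun l => (p, t, l)))

-- A's inner length loop, re-expressed as a bounded common-prefix length (proof helper)
def pvMatchLen (pred_words target_words : List String) (p t : Int) (limit : Int) (m : Nat) : Nat :=
  if h : (m : Int) < limit ∧ PySem.List.pyGet? pred_words (p + m) = PySem.List.pyGet? target_words (t + m)
  then pvMatchLen pred_words target_words p t limit (m + 1)
  else m
termination_by (limit - m).toNat
decreasing_by omega

theorem pvMatchLen_ge (pred_words target_words : List String) (p t limit : Int) (m : Nat) :
    m ≤ pvMatchLen pred_words target_words p t limit m := by
  fun_induction pvMatchLen pred_words target_words p t limit m with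
  | case1 m h ih => omega
  | case2 m h => omega

theorem pvMatchLen_step (pred_words target_words : List String) (p t limit : Int) (m : Nat)
    (h : (m : Int) < limit ∧ PySem.List.pyGet? pred_words (p + m) = PySem.List.pyGet? target_words (t + m)) :
    pvMatchLen pred_words target_words p t limit m = pvMatchLen pred_words target_words p t limit (m + 1) := by
  rw [pvMatchLen]; simp [h]

theorem pvMatchLen_stop (pred_words target_words : List String) (p t limit : Int) (m : Nat)
    (h : ¬ ((m : Int) < limit ∧ PySem.List.pyGet? pred_words (p + m) = PySem.List.pyGet? target_words (t + m))) :
    pvMatchLen pred_words target_words p t limit m = m := by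
  rw [pvMatchLen]; simp [h]

theorem pvRunL_succ (pred_words target_words : List String) (p t : Int)
    (h : 0 ≤ p ∧ p < (pred_words.length : Int) ∧ 0 ≤ t ∧ t < (target_words.length : Int) ∧
      PySem.List.pyGet? pred_words p = PySem.List.pyGet? target_words t) :
    pvRunL pred_words target_words p t = pvRunL pred_words target_words (p + 1) (t + 1) + 1 := by
  rw [pvRunL]; rw [dif_pos h]

theorem pvRunL_zero (pred_words target_words : List String) (p t : Int)
    (h : ¬ (0 ≤ p ∧ p < (pred_words.length : Int) ∧ 0 ≤ t ∧ t < (target_words.length : Int) ∧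
      PySem.List.pyGet? pred_words p = PySem.List.pyGet? target_words t)) :
    pvRunL pred_words target_words p t = 0 := by
  rw [pvRunL]; rw [dif_neg h]

theorem pvRunL_bounds (pred_words target_words : List String) (p t : Int) :
    pvRunL pred_words target_words p t = 0 ∨
      ((pvRunL pred_words target_words p t : Int) ≤ (pred_words.length : Int) - p ∧
       (pvRunL pred_words target_words p t : Int) ≤ (target_words.length : Int) - t) := by
  fun_induction pvRunL pred_words target_words p t with
  | case1 p t h ih =>
    right
    rcases ih with h0 | ⟨h1, h2⟩
    · rw [h0]; push_cast; omega
    · push_cast at h1 h2 ⊢; omega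
  | case2 p t h => left; rfl

theorem pvMatchLen_eq_runL (pred_words target_words : List String) (p t limit : Int)
    (hp : 0 ≤ p) (ht : 0 ≤ t)
    (hlp : limit ≤ (pred_words.length : Int) - p) (hlt : limit ≤ (target_words.length : Int) - t) :
    ∀ m : Nat, (m : Int) ≤ limit →
      pvMatchLen pred_words target_words p t limit m =
        m + min (pvRunL pred_words target_words (p + m) (t + m)) (limit - m).toNat := by
  intro m
  fun_induction pvMatchLen pred_words target_words p t limit m with
  | case1 m h ih =>
    intro hm
    have hrun : pvRunL pred_words target_words (p + m) (t + m)
        = pvRunL pred_words target_words (p + m + 1) (t + m + 1) + 1 :=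
      pvRunL_succ _ _ _ _ ⟨by omega, by omega, by omega, by omega, h.2⟩
    have := ih (by omega)
    rw [this, hrun]
    have e1 : p + ((m : Nat) + 1 : Nat) = p + m + 1 := by push_cast; ring
    have e2 : t + ((m : Nat) + 1 : Nat) = t + m + 1 := by push_cast; ring
    rw [e1, e2] at *
    omega
  | case2 m h =>
    intro hm
    by_cases hlim : (m : Int) < limit
    · have hmm : ¬ PySem.List.pyGet? pred_words (p + m) = PySem.List.pyGet? target_words (t + m) := by
        intro hc; exact h ⟨hlim, hc⟩
      have : pvRunL pred_words target_words (p + m) (t + m) = 0 :=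
        pvRunL_zero _ _ _ _ (by intro hc; exact hmm hc.2.2.2.2)
      rw [this]; omega
    · omega

-- the inner length loop of A equals the capped run length followed by a range emit
theorem innerA_eq (pred_words target_words : List String) (p t : Int) :
    ∀ (n j : Nat), n + j = 9 → (p + j < (pred_words.length : Int)) → (t + j < (target_words.length : Int)) →
    ∀ acc, pvInnerA pred_words target_words p t ((j : Int) + 1) n acc =
      acc ++ (PySem.List.pyRange ((j : Int) + 1)
        ((pvMatchLen pred_words target_words p t (min (min 9 ((pred_words.length : Int) - p)) ((target_words.length : Int) - t)) j : Int) + 1) 1).map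
        (fun l => (p, t, l)) := by
  intro n
  induction n with
  | zero =>
    intro j hnj hp ht acc
    have hj : j = 9 := by omega
    subst hj
    rw [pvMatchLen_stop _ _ _ _ _ _ (fun h => absurd h.1 (by push_cast; omega))]
    rw [PySem.List.pyRange_one_eq_nil (by omega)]
    simp [pvInnerA]
  | succ n ih =>
    intro j hnj hp ht acc
    simp only [pvInnerA]
    have e1 : p + ((j : Int) + 1) - 1 = p + (j : Int) := by ring
    have e2 : t + ((j : Int) + 1) - 1 = t + (j : Int) := by ring
    rw [e1, e2]
    by_cases heq : PySem.List.pyGet? pred_words (p + (j : Int)) = PySem.List.pyGet? target_words (t + (j : Int))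
    · rw [if_neg (by simpa using heq)]
      rw [pvMatchLen_step _ _ _ _ _ _ ⟨by omega, heq⟩]
      by_cases hc : (pred_words.length : Int) = p + ((j : Int) + 1) ∨ (target_words.length : Int) = t + ((j : Int) + 1)
      · rw [if_pos hc]
        rw [pvMatchLen_stop _ _ _ _ _ _ (fun h => absurd h.1 (by push_cast; omega))]
        rw [show ((((j : Nat) + 1 : Nat) : Int) + 1) = ((j : Int) + 1) + 1 by push_cast; ring]
        rw [PySem.List.pyRange_one_cons (by omega), PySem.List.pyRange_one_eq_nil (by omega)]
        simp
      · rw [if_neg hc]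
        have hm := pvMatchLen_ge pred_words target_words p t
          (min (min 9 ((pred_words.length : Int) - p)) ((target_words.length : Int) - t)) (j + 1)
        have := ih (j + 1) (by omega) (by push_cast at hc ⊢; omega) (by push_cast at hc ⊢; omega)
          (acc ++ [(p, t, (j : Int) + 1)])
        rw [show (((j : Nat) + 1 : Nat) : Int) + 1 = ((j : Int) + 1) + 1 by push_cast; ring] at this
        rw [this]
        rw [PySem.List.pyRange_one_cons (show (j : Int) + 1 < (pvMatchLen pred_words target_words p t
          (min (min 9 ((pred_words.length : Int) - p)) ((target_words.length : Int) - t)) (j + 1) : Int) + 1 by omega)]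
        simp
    · rw [if_pos (by simpa using heq)]
      rw [pvMatchLen_stop _ _ _ _ _ _ (fun h => absurd h.2 heq)]
      rw [PySem.List.pyRange_one_eq_nil (by omega)]
      simp

-- A's inner loop emits exactly pvRowA's integrand
theorem innerA_row (pred_words target_words : List String) (p t : Int)
    (hp0 : 0 ≤ p) (hp : p < (pred_words.length : Int))
    (ht0 : 0 ≤ t) (ht : t < (target_words.length : Int)) (acc : List (Int × Int × Int)) :
    pvInnerA pred_words target_words p t 1 9 acc =
      acc ++ (PySem.List.pyRange 1 (((min (pvRunL pred_words target_words p t) 9 : Nat) : Int) + 1) 1).map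
        (fun l => (p, t, l)) := by
  have h := innerA_eq pred_words target_words p t 9 0 rfl (by push_cast; omega) (by push_cast; omega) acc
  simp only [Nat.cast_zero, zero_add] at h
  rw [h]
  have hml := pvMatchLen_eq_runL pred_words target_words p t
      (min (min 9 ((pred_words.length : Int) - p)) ((target_words.length : Int) - t))
      hp0 ht0 (by omega) (by omega) 0 (by omega)
  simp only [Nat.cast_zero, add_zero, zero_add, Int.sub_zero] at hml
  rw [hml]
  have hb : ((min (pvRunL pred_words target_words p t)
      ((min (min 9 ((pred_words.length : Int) - p)) ((target_words.length : Int) - t)).toNat) : Nat) : Int) + 1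
      = ((min (pvRunL pred_words target_words p t) 9 : Nat) : Int) + 1 := by
    rcases pvRunL_bounds pred_words target_words p t with h0 | ⟨h1, h2⟩
    · rw [h0]; simp
    · omega
  rw [hb]

-- A's skip-continue scan over all target positions equals B's window scan
theorem filter_range_window (lo hi : Int) : ∀ (n : Nat),
    (PySem.List.pyRange 0 (n : Int) 1).filter (fun tval => decide (lo ≤ tval ∧ tval < hi)) =
      PySem.List.pyRange (max 0 lo) (min (n : Int) hi) 1 := by
  intro n
  induction n with
  | zero =>
    rw [PySem.List.pyRange_one_eq_nil (by omega), PySem.List.pyRange_one_eq_nil (by omega)]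
    rfl
  | succ n ih =>
    rw [show ((n + 1 : Nat) : Int) = (n : Int) + 1 by push_cast; ring,
        PySem.List.pyRange_one_succ_right (by omega), List.filter_append, ih]
    by_cases h1 : lo ≤ (n : Int) ∧ (n : Int) < hi
    · rw [show (min ((n : Int) + 1) hi) = min (n : Int) hi + 1 by omega,
          PySem.List.pyRange_one_succ_right (by omega)]
      simp only [List.filter, h1]
      have : min (n : Int) hi = (n : Int) := by omega
      simp [this]
    · have hf : (List.filter (fun tval => decide (lo ≤ tval ∧ tval < hi)) [(n : Int)]) = [] := by
        simp [List.filter, h1]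
      rw [hf, List.append_nil]
      by_cases h2 : hi ≤ (n : Int)
      · rw [show (min ((n : Int) + 1) hi) = min (n : Int) hi by omega]
      · rw [PySem.List.pyRange_one_eq_nil (by omega), PySem.List.pyRange_one_eq_nil (by omega)]

theorem foldl_skip_eq_filter {α β : Type} (P : β → Prop) [DecidablePred P] (g : α → β → α) :
    ∀ (l : List β) (acc : α),
      l.foldl (fun acc x => if P x then acc else g acc x) acc =
        (l.filter (fun x => decide (¬ P x))).foldl g acc := by
  intro l
  induction l with
  | nil => intro acc; rfl
  | cons x xs ih =>
    intro acc
    by_cases h : P x <;> simp [List.foldl, List.filter, h, ih]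

-- restricting a flatMap to the positions where the integrand is nonempty
theorem flatMap_filter_eq {α β : Type} (P : α → Prop) [DecidablePred P] (g h : α → List β) :
    ∀ (l : List α), (∀ x ∈ l, P x → g x = h x) → (∀ x ∈ l, ¬ P x → h x = []) →
      (l.filter (fun x => decide (P x))).flatMap g = l.flatMap h := by
  intro l
  induction l with
  | nil => intro _ _; rfl
  | cons x xs ih =>
    intro h1 h2
    by_cases hx : P x
    · simp only [List.filter_cons, decide_eq_true_eq, if_pos hx, List.flatMap_cons,
        h1 x (by simp) hx, ih (fun y hy => h1 y (by simp [hy])) (fun y hy => h2 y (by simp [hy]))]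
    · simp only [List.filter_cons, decide_eq_true_eq, if_neg hx, List.flatMap_cons,
        h2 x (by simp) hx, List.nil_append,
        ih (fun y hy => h1 y (by simp [hy])) (fun y hy => h2 y (by simp [hy]))]

-- a word match in getD form gives one step of the run recurrence
theorem pvRunL_match (pred_words target_words : List String) (p t : Int)
    (hp0 : 0 ≤ p) (hp : p < (pred_words.length : Int))
    (ht0 : 0 ≤ t) (ht : t < (target_words.length : Int))
    (hC : PySem.List.pyGetD target_words t "" = PySem.List.pyGetD pred_words p "") :
    pvRunL pred_words target_words p t = pvRunL pred_words target_words (p + 1) (t + 1) + 1 := by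
  refine pvRunL_succ _ _ _ _ ⟨hp0, hp, ht0, ht, ?_⟩
  rw [PySem.List.pyGet?_eq_some_getElem pred_words hp0 hp, PySem.List.pyGet?_eq_some_getElem target_words ht0 ht]
  rw [← PySem.List.pyGetD_eq_getElem pred_words "" hp0 hp, ← PySem.List.pyGetD_eq_getElem target_words "" ht0 ht]
  exact congrArg some hC.symm

theorem pvRunL_nomatch (pred_words target_words : List String) (p t : Int)
    (hp0 : 0 ≤ p) (hp : p < (pred_words.length : Int))
    (ht0 : 0 ≤ t) (ht : t < (target_words.length : Int))
    (hC : ¬ PySem.List.pyGetD target_words t "" = PySem.List.pyGetD pred_words p "") :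
    pvRunL pred_words target_words p t = 0 := by
  refine pvRunL_zero _ _ _ _ ?_
  rintro ⟨-, -, -, -, hm⟩
  apply hC
  rw [PySem.List.pyGet?_eq_some_getElem pred_words hp0 hp, PySem.List.pyGet?_eq_some_getElem target_words ht0 ht] at hm
  rw [PySem.List.pyGetD_eq_getElem target_words "" ht0 ht, PySem.List.pyGetD_eq_getElem pred_words "" hp0 hp]
  exact (Option.some.inj hm).symm

theorem rowLoopB_spec (pred_words target_words : List String) (prev : PySem.Dict Int Int) (p : Int)
    (hp0 : 0 ≤ p) (hp : p < (pred_words.length : Int))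
    (hprev : ∀ t, prev.getD t 0 = pvR pred_words target_words (p + 1) t) :
    (pvRowLoopB pred_words target_words prev p).2 = pvRowA pred_words target_words p ∧
    (∀ t', (pvRowLoopB pred_words target_words prev p).1.getD t' 0 = pvR pred_words target_words p t') := by
  unfold pvRowLoopB
  dsimp only
  -- run value looked up for a matching in-window target position
  have hv : ∀ t : Int, max 0 (p - 50) ≤ t → t < min (target_words.length : Int) (p + 51) →
      PySem.List.pyGetD target_words t "" = PySem.List.pyGetD pred_words p "" →
      prev.getD (t + 1) 0 + 1 = ((pvRunL pred_words target_words p t : Nat) : Int) := by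
    intro t h1 h2 hC
    rw [hprev (t + 1)]
    unfold pvR
    rw [if_pos (by omega)]
    rw [pvRunL_match pred_words target_words p t hp0 hp (by omega) (by omega) hC]
    push_cast; ring
  -- split the paired fold into its two independent components
  have hfun : (fun (cr : PySem.Dict Int Int × List (Int × Int × Int)) (t : Int) =>
        if PySem.List.pyGetD target_words t "" = PySem.List.pyGetD pred_words p "" then
          let run := prev.getD (t + 1) 0 + 1
          let cur := cr.1.insert t run
          let m := min run 9
          let row := (PySem.List.pyRange 1 (m + 1) 1).foldl (fun row length => row ++ [(p, t, length)]) cr.2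
          (cur, row)
        else cr)
      = (fun cr t =>
        ((if PySem.List.pyGetD target_words t "" = PySem.List.pyGetD pred_words p "" then
            cr.1.insert t (prev.getD (t + 1) 0 + 1) else cr.1),
         (if PySem.List.pyGetD target_words t "" = PySem.List.pyGetD pred_words p "" then
            cr.2 ++ (PySem.List.pyRange 1 (min (prev.getD (t + 1) 0 + 1) 9 + 1) 1).map (fun l => (p, t, l))
          else cr.2))) := by
    funext cr t
    by_cases h : PySem.List.pyGetD target_words t "" = PySem.List.pyGetD pred_words p ""
    · simp only [if_pos h]
      rw [PySem.List.foldl_append_singleton_eq_map]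
    · simp only [if_neg h]
  rw [hfun]
  rw [PySem.List.foldl_prod_mk
    (f := fun (d : PySem.Dict Int Int) (t : Int) =>
      if PySem.List.pyGetD target_words t "" = PySem.List.pyGetD pred_words p "" then
        d.insert t (prev.getD (t + 1) 0 + 1) else d)
    (g := fun (row : List (Int × Int × Int)) (t : Int) =>
      if PySem.List.pyGetD target_words t "" = PySem.List.pyGetD pred_words p "" then
        row ++ (PySem.List.pyRange 1 (min (prev.getD (t + 1) 0 + 1) 9 + 1) 1).map (fun l => (p, t, l))
      else row)]
  constructor
  · -- the emitted row
    dsimp only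
    rw [PySem.List.foldl_ite_eq_foldl_filter
      (p := fun t => PySem.List.pyGetD target_words t "" = PySem.List.pyGetD pred_words p "")]
    rw [PySem.List.foldl_append_eq_flatMap, List.nil_append]
    unfold pvRowA
    refine flatMap_filter_eq _ _ _ _ ?_ ?_
    · intro t hmem hC
      rw [PySem.List.mem_pyRange_one] at hmem
      rw [hv t hmem.1 hmem.2 hC]
      have hb : ((pvRunL pred_words target_words p t : Nat) : Int) ⊓ 9 + 1
          = ((min (pvRunL pred_words target_words p t) 9 : Nat) : Int) + 1 := by omega
      rw [hb]
    · intro t hmem hC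
      rw [PySem.List.mem_pyRange_one] at hmem
      rw [pvRunL_nomatch pred_words target_words p t hp0 hp (by omega) (by omega) hC]
      rw [show ((min 0 9 : Nat) : Int) + 1 = 1 by simp]
      rw [PySem.List.pyRange_one_eq_nil (by omega)]
      rfl
  · -- the dict for the next row
    intro t'
    dsimp only
    rw [PySem.List.foldl_ite_eq_foldl_filter
      (p := fun t => PySem.List.pyGetD target_words t "" = PySem.List.pyGetD pred_words p "")]
    have hW : ((PySem.List.pyRange (max 0 (p - 50)) (min (target_words.length : Int) (p + 51)) 1).filter
        (fun t => decide (PySem.List.pyGetD target_words t "" = PySem.List.pyGetD pred_words p ""))).Nodup :=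
      (PySem.List.nodup_pyRange_one _ _).filter _
    have hitems : ((((PySem.List.pyRange (max 0 (p - 50)) (min (target_words.length : Int) (p + 51)) 1).filter
        (fun t => decide (PySem.List.pyGetD target_words t "" = PySem.List.pyGetD pred_words p ""))).foldl
        (fun (d : PySem.Dict Int Int) t => d.insert t (prev.getD (t + 1) 0 + 1)) PySem.Dict.empty).items)
        = ((PySem.List.pyRange (max 0 (p - 50)) (min (target_words.length : Int) (p + 51)) 1).filter
        (fun t => decide (PySem.List.pyGetD target_words t "" = PySem.List.pyGetD pred_words p ""))).map
          (fun t => (t, prev.getD (t + 1) 0 + 1)) := by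
      simpa using PySem.Dict.items_foldl_insert_fresh
        (l := (PySem.List.pyRange (max 0 (p - 50)) (min (target_words.length : Int) (p + 51)) 1).filter
          (fun t => decide (PySem.List.pyGetD target_words t "" = PySem.List.pyGetD pred_words p "")))
        (k := fun t => t) (v := fun t => prev.getD (t + 1) 0 + 1) (d := PySem.Dict.empty)
        (by intro a _; exact PySem.Dict.contains_empty a)
        (by simpa using hW)
    have hkeys : (((PySem.List.pyRange (max 0 (p - 50)) (min (target_words.length : Int) (p + 51)) 1).filter
        (fun t => decide (PySem.List.pyGetD target_words t "" = PySem.List.pyGetD pred_words p ""))).foldl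
        (fun (d : PySem.Dict Int Int) t => d.insert t (prev.getD (t + 1) 0 + 1)) PySem.Dict.empty).keys
        = (PySem.List.pyRange (max 0 (p - 50)) (min (target_words.length : Int) (p + 51)) 1).filter
        (fun t => decide (PySem.List.pyGetD target_words t "" = PySem.List.pyGetD pred_words p "")) := by
      simp only [PySem.Dict.keys, hitems]
      simp [Function.comp_def]
    by_cases hmem : t' ∈ (PySem.List.pyRange (max 0 (p - 50)) (min (target_words.length : Int) (p + 51)) 1).filter
        (fun t => decide (PySem.List.pyGetD target_words t "" = PySem.List.pyGetD pred_words p ""))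
    · have hin : (t', prev.getD (t' + 1) 0 + 1) ∈ (((PySem.List.pyRange (max 0 (p - 50)) (min (target_words.length : Int) (p + 51)) 1).filter
          (fun t => decide (PySem.List.pyGetD target_words t "" = PySem.List.pyGetD pred_words p ""))).foldl
          (fun (d : PySem.Dict Int Int) t => d.insert t (prev.getD (t + 1) 0 + 1)) PySem.Dict.empty).items := by
        rw [hitems]
        simpa using List.mem_map_of_mem hmem (f := fun t => (t, prev.getD (t + 1) 0 + 1))
      rw [PySem.Dict.getD_of_mem_items _ hin (by rw [hkeys]; exact hW) 0]
      rw [List.mem_filter, PySem.List.mem_pyRange_one, decide_eq_true_eq] at hmem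
      obtain ⟨⟨h1, h2⟩, hC⟩ := hmem
      rw [hv t' h1 h2 hC]
      unfold pvR
      rw [if_pos (by omega)]
    · have hcon : (((PySem.List.pyRange (max 0 (p - 50)) (min (target_words.length : Int) (p + 51)) 1).filter
          (fun t => decide (PySem.List.pyGetD target_words t "" = PySem.List.pyGetD pred_words p ""))).foldl
          (fun (d : PySem.Dict Int Int) t => d.insert t (prev.getD (t + 1) 0 + 1)) PySem.Dict.empty).contains t' = false := by
        rw [PySem.Dict.contains_eq_decide_mem_keys, hkeys]
        simpa using hmem
      rw [PySem.Dict.getD_of_not_contains _ 0 hcon]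
      unfold pvR
      by_cases hw : p - 50 ≤ t' ∧ t' < p + 51
      · rw [if_pos hw]
        by_cases hb : 0 ≤ t' ∧ t' < (target_words.length : Int)
        · have hC : ¬ PySem.List.pyGetD target_words t' "" = PySem.List.pyGetD pred_words p "" := by
            intro hC
            exact hmem (by
              rw [List.mem_filter, PySem.List.mem_pyRange_one, decide_eq_true_eq]
              exact ⟨⟨by omega, by omega⟩, hC⟩)
          rw [pvRunL_nomatch pred_words target_words p t' hp0 hp hb.1 hb.2 hC]
          rfl
        · rw [pvRunL_zero _ _ _ _ (by rintro ⟨-, -, h1, h2, -⟩; exact hb ⟨h1, h2⟩)]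
          rfl
      · rw [if_neg hw]

theorem outerB (pred_words target_words : List String) : ∀ (n : Nat), n ≤ pred_words.length →
    ∀ (rows : List (List (Int × Int × Int))) (d : PySem.Dict Int Int),
      (∀ t, d.getD t 0 = pvR pred_words target_words (n : Int) t) →
      ((PySem.List.pyRange ((n : Int) - 1) (-1) (-1)).foldl
        (fun (s : List (List (Int × Int × Int)) × PySem.Dict Int Int) p =>
          let inner := pvRowLoopB pred_words target_words s.2 p
          (s.1 ++ [inner.2], inner.1)) (rows, d)).1
      = rows ++ (PySem.List.pyRange ((n : Int) - 1) (-1) (-1)).map (pvRowA pred_words target_words) := by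
  intro n
  induction n with
  | zero =>
    intro _ rows d _
    rw [PySem.List.pyRange_neg_one_eq_nil (by omega)]
    simp
  | succ n ih =>
    intro hn rows d hd
    have hcons : PySem.List.pyRange (((n + 1 : Nat) : Int) - 1) (-1) (-1)
        = (n : Int) :: PySem.List.pyRange ((n : Int) - 1) (-1) (-1) := by
      rw [show ((n + 1 : Nat) : Int) - 1 = (n : Int) by push_cast; ring]
      exact PySem.List.pyRange_neg_one_cons (by omega)
    rw [hcons]
    have hd' : ∀ t, d.getD t 0 = pvR pred_words target_words ((n : Int) + 1) t := by
      intro t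
      rw [hd t]
      norm_num
    obtain ⟨hrow, hdict⟩ := rowLoopB_spec pred_words target_words d (n : Int) (by omega)
      (by exact_mod_cast Nat.lt_of_lt_of_le (Nat.lt_succ_self n) hn) hd'
    simp only [List.foldl_cons, List.map_cons]
    rw [ih (by omega) (rows ++ [(pvRowLoopB pred_words target_words d (n : Int)).2])
      (pvRowLoopB pred_words target_words d (n : Int)).1 hdict]
    rw [hrow]
    simp

-- ===== VERDICT (by name: the statement is the Claim_ definition above) =====
theorem find_shifted_pairs_py_spec : Claim_equal_find_shifted_pairs_py := by
  intro pred_words target_words _hdom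
  unfold Spec_find_shifted_pairs_py find_shifted_pairs_py find_shifted_pairs_py_alt
  dsimp only
  -- the A side is the row-wise concatenation of pvRowA
  have hA : (PySem.List.pyRange 0 (pred_words.length : Int) 1).foldl (fun acc p =>
      (PySem.List.pyRange 0 (target_words.length : Int) 1).foldl (fun acc t =>
        if 50 < (t - p).natAbs then acc
        else pvInnerA pred_words target_words p t 1 9 acc) acc) []
      = (PySem.List.pyRange 0 (pred_words.length : Int) 1).flatMap (pvRowA pred_words target_words) := by
    refine Eq.trans (PySem.List.foldl_congr_mem _ _
      (fun acc p => acc ++ pvRowA pred_words target_words p) _ ?_) ?_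
    · intro acc p hp
      rw [PySem.List.mem_pyRange_one] at hp
      refine Eq.trans (foldl_skip_eq_filter (fun tval => 50 < (tval - p).natAbs)
        (fun acc t => pvInnerA pred_words target_words p t 1 9 acc) _ acc) ?_
      have hfun2 : (fun x : Int => decide (¬ 50 < (x - p).natAbs))
          = (fun tval : Int => decide (p - 50 ≤ tval ∧ tval < p + 51)) := by
        funext x
        rw [decide_eq_decide]
        omega
      rw [hfun2, filter_range_window (p - 50) (p + 51) target_words.length]
      refine Eq.trans (PySem.List.foldl_congr_mem _ _
        (fun acc t => acc ++ (PySem.List.pyRange 1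
          (((min (pvRunL pred_words target_words p t) 9 : Nat) : Int) + 1) 1).map (fun l => (p, t, l))) _ ?_) ?_
      · intro acc' t ht
        rw [PySem.List.mem_pyRange_one] at ht
        exact innerA_row pred_words target_words p t (by omega) (by omega) (by omega) (by omega) acc'
      · rw [PySem.List.foldl_append_eq_flatMap]
        rfl
    · rw [PySem.List.foldl_append_eq_flatMap, List.nil_append]
  rw [hA]
  -- the B side is the same concatenation, built backwards and reversed
  have hd0 : ∀ t, (PySem.Dict.empty : PySem.Dict Int Int).getD t 0
      = pvR pred_words target_words ((pred_words.length : Nat) : Int) t := by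
    intro t
    rw [PySem.Dict.getD_of_not_contains _ 0 (PySem.Dict.contains_empty t)]
    unfold pvR
    by_cases hw : ((pred_words.length : Nat) : Int) - 50 ≤ t ∧ t < ((pred_words.length : Nat) : Int) + 51
    · rw [if_pos hw, pvRunL_zero _ _ _ _ (by rintro ⟨-, h, -⟩; omega)]
      rfl
    · rw [if_neg hw]
  rw [outerB pred_words target_words pred_words.length le_rfl [] PySem.Dict.empty hd0]
  rw [List.nil_append, PySem.List.foldl_append_eq_flatten, List.nil_append]
  rw [PySem.List.pyRange_neg_one_eq_reverse]
  rw [show (-1 : Int) + 1 = 0 by ring, show (pred_words.length : Int) - 1 + 1 = (pred_words.length : Int) by ring]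
  rw [← List.map_reverse, List.reverse_reverse, ← List.flatMap_def]
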